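-- pv_equiv track=rewrite | github.com/RemcoSchrijver/advent-of-code | 2024/src/day12.py | create_plots
-- ===== SOURCE A (Python) =====
-- def create_plots(grid: list[list[str]]) -> dict[str, list[set[tuple[int, int]]]]:
--     result = {}
--     for y, row in enumerate(grid):
--         for x, tile in enumerate(row):
--             if tile in result and position_in_plot((y, x), result[tile]):
--                 continue
--             else:
--                 garden_plot = explore_garden_plot(tile, (y, x), grid, set())
--                 if tile not in result:
--                     result[tile] = [garden_plot]
--                 else:
--                     result[tile].append(garden_plot)
--     return result
--
-- def position_in_plot(
--     position: tuple[int, int], plots: list[set[tuple[int, int]]]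
-- ) -> bool:
--     for plot in plots:
--         if position in plot:
--             return True
--     else:
--         return False
--
-- def explore_garden_plot(
--     original_tile: str,
--     position: tuple[int, int],
--     grid: list[list[str]],
--     cache: set[tuple[int, int]],
-- ) -> set[tuple[int, int]]:
--     if position in cache:
--         return cache
--     y, x = position
--     if y < 0 or y >= len(grid) or x < 0 or x >= len(grid[y]):
--         return set()
--     tile_type = grid[y][x]
--     if tile_type != original_tile:
--         return set()
--     cache.add(position)
--     cache = cache.union(
--         *[
--             explore_garden_plot(original_tile, (y - 1, x), grid, cache),
--             explore_garden_plot(original_tile, (y, x - 1), grid, cache),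
--             explore_garden_plot(original_tile, (y + 1, x), grid, cache),
--             explore_garden_plot(original_tile, (y, x + 1), grid, cache),
--         ]
--     )
--
--     return cache
-- ===== SOURCE B (Python) =====
-- def create_plots(grid: list[list[str]]) -> dict[str, list[set[tuple[int, int]]]]:
--     # Single global visited set + iterative stack flood fill: each cell is
--     # processed O(1) times instead of rescanning every existing plot per cell.
--     result = {}
--     visited = set()
--     for y, row in enumerate(grid):
--         for x, tile in enumerate(row):
--             if (y, x) in visited:
--                 continue
--             region = set()
--             stack = [(y, x)]
--             while stack:
--                 py, px = stack.pop()
--                 if (py, px) in region: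
--                     continue
--                 if py < 0 or py >= len(grid) or px < 0 or px >= len(grid[py]):
--                     continue
--                 if grid[py][px] != tile:
--                     continue
--                 region.add((py, px))
--                 stack.extend([(py, px + 1), (py + 1, px), (py, px - 1), (py - 1, px)])
--             result.setdefault(tile, []).append(region)
--             visited |= region
--     return result
-- ===== Notes on version B (the rewrite author's own statement) =====
-- stated objective: faster
-- what changed: A rescans every stored plot of a tile for each cell and explores regions by deep recursion over a shared mutating set with redundant unions; B keeps one global visited set (O(1) skip test per cell) and grows each region with an iterative stack flood fill, so every cell is processed a constant number of times.
import Mathlib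
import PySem

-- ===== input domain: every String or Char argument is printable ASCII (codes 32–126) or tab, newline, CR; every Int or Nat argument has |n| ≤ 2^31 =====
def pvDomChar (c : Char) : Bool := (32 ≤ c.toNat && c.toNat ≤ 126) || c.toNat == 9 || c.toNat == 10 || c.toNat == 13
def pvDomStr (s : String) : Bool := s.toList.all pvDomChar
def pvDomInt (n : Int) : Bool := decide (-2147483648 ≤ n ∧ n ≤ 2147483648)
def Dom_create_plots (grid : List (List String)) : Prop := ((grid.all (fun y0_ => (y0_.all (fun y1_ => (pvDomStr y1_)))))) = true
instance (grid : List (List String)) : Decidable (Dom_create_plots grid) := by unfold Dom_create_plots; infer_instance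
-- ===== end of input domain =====

-- B replaces A's per-cell rescan of every stored plot and its recursive set-union
-- exploration by one global visited set and an iterative stack flood fill (alternative,
-- structurally different; equivalence proved on the RETURN value).

-- ===== PORT A =====

-- helper position_in_plot: loop over plots with early return True
def position_in_plot (position : Int × Int) (plots : List (List (Int × Int))) : Bool :=
  plots.any (fun plot => decide (position ∈ plot))

-- helper explore_garden_plot. Python mutates the shared `cache` set in place, so the
-- port threads the state: it returns (Python return value, final state of `cache`).
-- The sibling return values r1..r4 are value snapshots; they are always subsets of the
-- final state, so the final `cache.union(*[r1,r2,r3,r4])` is value-exact here.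
-- `fuel` only guards termination; create_plots passes cells+1, proved sufficient below.
def explore_garden_plot (fuel : Nat) (original_tile : String) (position : Int × Int)
    (grid : List (List String)) (cache : PySem.Set (Int × Int)) :
    PySem.Set (Int × Int) × PySem.Set (Int × Int) :=
  match fuel with
  | 0 => (PySem.Set.empty, cache)
  | fuel + 1 =>
    if position ∈ cache then (cache, cache)
    else if position.1 < 0 ∨ (grid.length : Int) ≤ position.1 ∨ position.2 < 0 ∨
        ((PySem.List.pyGetD grid position.1 []).length : Int) ≤ position.2 then
      (PySem.Set.empty, cache)
    else if PySem.List.pyGetD (PySem.List.pyGetD grid position.1 []) position.2 "" ≠ original_tile then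
      (PySem.Set.empty, cache)
    else
      let c0 := PySem.Set.add cache position
      let p1 := explore_garden_plot fuel original_tile (position.1 - 1, position.2) grid c0
      let p2 := explore_garden_plot fuel original_tile (position.1, position.2 - 1) grid p1.2
      let p3 := explore_garden_plot fuel original_tile (position.1 + 1, position.2) grid p2.2
      let p4 := explore_garden_plot fuel original_tile (position.1, position.2 + 1) grid p3.2
      ((((PySem.Set.union p4.2 p1.1).union p2.1).union p3.1).union p4.1, p4.2)

def create_plots (grid : List (List String)) : List (String × List (List (Int × Int))) :=
  let fuel := (grid.map List.length).sum + 1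
  let result : PySem.Dict String (List (List (Int × Int))) :=
    (PySem.List.enumerate grid).foldl (fun result yr =>
      (PySem.List.enumerate yr.2).foldl (fun result xt =>
        if result.contains xt.2 && position_in_plot (yr.1, xt.1) (result.getD xt.2 []) then
          result
        else
          let garden_plot := (explore_garden_plot fuel xt.2 (yr.1, xt.1) grid PySem.Set.empty).1
          if !(result.contains xt.2) then result.insert xt.2 [garden_plot]
          else result.insert xt.2 (result.getD xt.2 [] ++ [garden_plot])
      ) result
    ) PySem.Dict.empty
  result.items

-- ===== PORT B =====

-- all in-bounds coordinates of the grid / how many of them are not yet in `region`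
-- (used only for flood's termination measure and in the proofs)
def pvCells (grid : List (List String)) : List (Int × Int) :=
  (PySem.List.enumerate grid).flatMap (fun yr => (PySem.List.enumerate yr.2).map (fun xt => (yr.1, xt.1)))

def pvFree (grid : List (List String)) (region : List (Int × Int)) : Nat :=
  ((pvCells grid).filter (fun c => !(region.contains c))).length

theorem pvMem_cells (grid : List (List String)) (p : Int × Int)
    (h : ¬(p.1 < 0 ∨ (grid.length : Int) ≤ p.1 ∨ p.2 < 0 ∨
      ((PySem.List.pyGetD grid p.1 []).length : Int) ≤ p.2)) : p ∈ pvCells grid := by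
  push Not at h
  obtain ⟨h1, h2, h3, h4⟩ := h
  have hy : p.1.toNat < grid.length := by omega
  have hrow : PySem.List.pyGetD grid p.1 [] = grid[p.1.toNat] := PySem.List.pyGetD_eq_getElem grid [] h1 h2
  rw [hrow] at h4
  have hx : p.2.toNat < (grid[p.1.toNat]).length := by omega
  simp only [pvCells, List.mem_flatMap]
  refine ⟨(p.1, grid[p.1.toNat]), ?_, ?_⟩
  · rw [PySem.List.mem_enumerate_iff]
    exact ⟨p.1.toNat, hy, by simp; omega⟩
  · simp only [List.mem_map]
    refine ⟨(p.2, grid[p.1.toNat][p.2.toNat]), ?_, ?_⟩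
    · rw [PySem.List.mem_enumerate_iff]
      exact ⟨p.2.toNat, hx, by simp; omega⟩
    · simp

theorem pvFree_lt (grid : List (List String)) (region : List (Int × Int)) (p : Int × Int)
    (hc : p ∈ pvCells grid) (hn : p ∉ region) :
    pvFree grid (PySem.Set.add region p) < pvFree grid region := by
  unfold pvFree
  rw [PySem.Set.add_of_not_mem hn]
  have hsub : ∀ c : Int × Int, ((region ++ [p]).contains c = false) → (region.contains c = false) := by
    intro c hcc
    simp only [List.contains_append, Bool.or_eq_false_iff] at hcc
    exact hcc.1
  have h1 : (pvCells grid).filter (fun c => !((region ++ [p]).contains c))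
      = ((pvCells grid).filter (fun c => !(region.contains c))).filter (fun c => !((region ++ [p]).contains c)) := by
    rw [List.filter_filter]
    apply List.filter_congr
    intro c _
    cases hrc : (region ++ [p]).contains c with
    | true => simp
    | false => simp [hrc, show c ∉ region by simpa using hsub c hrc]
  rw [h1]
  apply List.length_filter_lt_length_iff_exists.2
  refine ⟨p, ?_, ?_⟩
  · simp only [List.mem_filter]
    exact ⟨hc, by simpa using hn⟩
  · simp

-- B's flood fill: the while-loop of Source B, stack top at the head of the list
def flood (grid : List (List String)) (tile : String) :
    List (Int × Int) → PySem.Set (Int × Int) → PySem.Set (Int × Int)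
  | [], region => region
  | p :: rest, region =>
    if hm : p ∈ region then flood grid tile rest region
    else if hb : p.1 < 0 ∨ (grid.length : Int) ≤ p.1 ∨ p.2 < 0 ∨
        ((PySem.List.pyGetD grid p.1 []).length : Int) ≤ p.2 then
      flood grid tile rest region
    else if PySem.List.pyGetD (PySem.List.pyGetD grid p.1 []) p.2 "" ≠ tile then
      flood grid tile rest region
    else
      flood grid tile ((p.1 - 1, p.2) :: (p.1, p.2 - 1) :: (p.1 + 1, p.2) :: (p.1, p.2 + 1) :: rest)
        (PySem.Set.add region p)
  termination_by stack region => (pvFree grid region, stack.length)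
  decreasing_by
  · exact Prod.Lex.right _ (Nat.lt_succ_self _)
  · exact Prod.Lex.right _ (Nat.lt_succ_self _)
  · exact Prod.Lex.right _ (Nat.lt_succ_self _)
  · exact Prod.Lex.left _ _ (pvFree_lt grid region p (pvMem_cells grid p hb) hm)

def create_plots_alt (grid : List (List String)) : List (String × List (List (Int × Int))) :=
  let st : PySem.Dict String (List (List (Int × Int))) × PySem.Set (Int × Int) :=
    (PySem.List.enumerate grid).foldl (fun st yr =>
      (PySem.List.enumerate yr.2).foldl (fun st xt =>
        if (yr.1, xt.1) ∈ st.2 then st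
        else
          let region := flood grid xt.2 [(yr.1, xt.1)] PySem.Set.empty
          (st.1.modify xt.2 [] (· ++ [region]), st.2.union region)
      ) st
    ) (PySem.Dict.empty, PySem.Set.empty)
  st.1.items

-- ===== PRECONDITION & SPEC =====
def Spec_create_plots (grid : List (List String)) (out : List (String × List (List (Int × Int)))) : Prop := out = create_plots_alt grid
instance (grid : List (List String)) (out : List (String × List (List (Int × Int)))) : Decidable (Spec_create_plots grid out) := by unfold Spec_create_plots; infer_instance

-- ===== CLAIM (what is proved, stated in full; the proofs are below) =====
def Claim_equal_create_plots : Prop := ∀ (grid : List (List String)), Dom_create_plots grid → Spec_create_plots grid (create_plots grid)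

-- ===== LEMMAS AND PROOFS =====

theorem flood_prefix (grid : List (List String)) (tile : String) (stack : List (Int × Int))
    (region : PySem.Set (Int × Int)) : region <+: flood grid tile stack region := by
  fun_induction flood with
  | case1 => exact List.prefix_rfl
  | case2 p rest r hm ih => exact ih
  | case3 p rest r hm hb ih => exact ih
  | case4 p rest r hm hb ht ih => exact ih
  | case5 p rest r hm hb ht ih =>
    refine List.IsPrefix.trans ?_ ih
    rw [PySem.Set.add_of_not_mem hm]
    exact ⟨[p], rfl⟩

theorem pvFree_le_of_prefix (grid : List (List String)) (r r' : List (Int × Int))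
    (h : r <+: r') : pvFree grid r' ≤ pvFree grid r := by
  unfold pvFree
  have h1 : (pvCells grid).filter (fun c => !(r'.contains c))
      = ((pvCells grid).filter (fun c => !(r.contains c))).filter (fun c => !(r'.contains c)) := by
    rw [List.filter_filter]
    apply List.filter_congr
    intro c _
    cases hrc : r'.contains c with
    | true => simp
    | false =>
      have hr : c ∉ r := fun hm => absurd (h.subset hm) (by simpa using hrc)
      simp [hrc, hr]
  rw [h1]
  exact List.length_filter_le _ _

theorem mem_flood_iff (grid : List (List String)) (tile : String) (stack : List (Int × Int))
    (region : PySem.Set (Int × Int)) (q : Int × Int) (h : q ∈ flood grid tile stack region) :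
    q ∈ region ∨ (¬(q.1 < 0 ∨ (grid.length : Int) ≤ q.1 ∨ q.2 < 0 ∨
      ((PySem.List.pyGetD grid q.1 []).length : Int) ≤ q.2) ∧
      PySem.List.pyGetD (PySem.List.pyGetD grid q.1 []) q.2 "" = tile) := by
  fun_induction flood with
  | case1 => exact Or.inl h
  | case2 p rest r hm ih => exact ih h
  | case3 p rest r hm hb ih => exact ih h
  | case4 p rest r hm hb ht ih => exact ih h
  | case5 p rest r hm hb ht ih =>
    rcases ih h with h1 | h2
    · rw [PySem.Set.add_of_not_mem hm] at h1
      rcases List.mem_append.1 h1 with h3 | h3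
      · exact Or.inl h3
      · simp only [List.mem_singleton] at h3
        subst h3
        exact Or.inr ⟨hb, by simpa using ht⟩
    · exact Or.inr h2

theorem flood_append (grid : List (List String)) (tile : String) (s1 s2 : List (Int × Int))
    (region : PySem.Set (Int × Int)) :
    flood grid tile (s1 ++ s2) region = flood grid tile s2 (flood grid tile s1 region) := by
  induction s1, region using flood.induct grid tile with
  | case1 r =>
    conv_rhs => rw [flood]
    rw [List.nil_append]
  | case2 p rest r hm ih =>
    rw [List.cons_append, flood, dif_pos hm, ih, flood, dif_pos hm]
  | case3 p rest r hm hb ih =>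
    rw [List.cons_append, flood, dif_neg hm, dif_pos hb, ih, flood, dif_neg hm, dif_pos hb]
  | case4 p rest r hm hb ht ih =>
    rw [List.cons_append, flood, dif_neg hm, dif_neg hb, if_pos ht, ih, flood, dif_neg hm, dif_neg hb, if_pos ht]
  | case5 p rest r hm hb ht ih =>
    rw [List.cons_append, flood, dif_neg hm, dif_neg hb, if_neg ht]
    conv_rhs => rw [flood, dif_neg hm, dif_neg hb, if_neg ht]
    exact ih

-- union with a subset is a no-op
theorem union_of_subset {s t : PySem.Set (Int × Int)} (h : ∀ x ∈ t, x ∈ s) :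
    PySem.Set.union s t = s := by
  show PySem.Set.update s t = s
  rw [PySem.Set.update_eq_append_filter]
  have : (PySem.Set.ofList t).filter (fun y => !(PySem.Set.contains s y)) = [] := by
    rw [List.filter_eq_nil_iff]
    intro a ha
    have := h a ((PySem.Set.mem_ofList (xs := t) (y := a)).1 ha)
    simpa using this
  rw [this, List.append_nil]

set_option maxHeartbeats 2000000 in
theorem explore_eq : ∀ (fuel : Nat) (t : String) (p : Int × Int) (grid : List (List String))
    (cache : PySem.Set (Int × Int)), pvFree grid cache < fuel →
    explore_garden_plot fuel t p grid cache =
      ((if p ∈ cache then cache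
        else if p.1 < 0 ∨ (grid.length : Int) ≤ p.1 ∨ p.2 < 0 ∨
            ((PySem.List.pyGetD grid p.1 []).length : Int) ≤ p.2 then PySem.Set.empty
        else if PySem.List.pyGetD (PySem.List.pyGetD grid p.1 []) p.2 "" ≠ t then PySem.Set.empty
        else flood grid t [p] cache),
       flood grid t [p] cache)
  | 0, t, p, grid, cache => by
    intro h
    exact absurd h (Nat.not_lt_zero _)
  | (n+1), t, p, grid, cache => by
    intro hf
    by_cases hm : p ∈ cache
    · have hfl : flood grid t [p] cache = cache := by rw [flood, dif_pos hm, flood]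
      simp only [explore_garden_plot, if_pos hm, hfl]
    · by_cases hb : p.1 < 0 ∨ (grid.length : Int) ≤ p.1 ∨ p.2 < 0 ∨
          ((PySem.List.pyGetD grid p.1 []).length : Int) ≤ p.2
      · have hfl : flood grid t [p] cache = cache := by rw [flood, dif_neg hm, dif_pos hb, flood]
        simp only [explore_garden_plot, if_neg hm, if_pos hb, hfl]
      · by_cases ht : PySem.List.pyGetD (PySem.List.pyGetD grid p.1 []) p.2 "" ≠ t
        · have hfl : flood grid t [p] cache = cache := by
            rw [flood, dif_neg hm, dif_neg hb, if_pos ht, flood]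
          simp only [explore_garden_plot, if_neg hm, if_neg hb, if_pos ht, hfl]
        · have hcells := pvMem_cells grid p hb
          have hfree0 : pvFree grid (PySem.Set.add cache p) < n := by
            have h1 := pvFree_lt grid cache p hcells hm
            omega
          have e1 := explore_eq n t (p.1 - 1, p.2) grid (PySem.Set.add cache p) hfree0
          have hpre1 := flood_prefix grid t [(p.1 - 1, p.2)] (PySem.Set.add cache p)
          have hfree1 : pvFree grid (flood grid t [(p.1 - 1, p.2)] (PySem.Set.add cache p)) < n :=
            lt_of_le_of_lt (pvFree_le_of_prefix grid _ _ hpre1) hfree0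
          have e2 := explore_eq n t (p.1, p.2 - 1) grid _ hfree1
          have hpre2 := flood_prefix grid t [(p.1, p.2 - 1)]
            (flood grid t [(p.1 - 1, p.2)] (PySem.Set.add cache p))
          have hfree2 : pvFree grid (flood grid t [(p.1, p.2 - 1)]
              (flood grid t [(p.1 - 1, p.2)] (PySem.Set.add cache p))) < n :=
            lt_of_le_of_lt (pvFree_le_of_prefix grid _ _ hpre2) hfree1
          have e3 := explore_eq n t (p.1 + 1, p.2) grid _ hfree2
          have hpre3 := flood_prefix grid t [(p.1 + 1, p.2)] (flood grid t [(p.1, p.2 - 1)]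
            (flood grid t [(p.1 - 1, p.2)] (PySem.Set.add cache p)))
          have hfree3 : pvFree grid (flood grid t [(p.1 + 1, p.2)] (flood grid t [(p.1, p.2 - 1)]
              (flood grid t [(p.1 - 1, p.2)] (PySem.Set.add cache p)))) < n :=
            lt_of_le_of_lt (pvFree_le_of_prefix grid _ _ hpre3) hfree2
          have e4 := explore_eq n t (p.1, p.2 + 1) grid _ hfree3
          have hpre4 := flood_prefix grid t [(p.1, p.2 + 1)] (flood grid t [(p.1 + 1, p.2)]
            (flood grid t [(p.1, p.2 - 1)] (flood grid t [(p.1 - 1, p.2)] (PySem.Set.add cache p))))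
          have hstep : flood grid t [p] cache = flood grid t [(p.1, p.2 + 1)]
              (flood grid t [(p.1 + 1, p.2)] (flood grid t [(p.1, p.2 - 1)]
                (flood grid t [(p.1 - 1, p.2)] (PySem.Set.add cache p)))) := by
            rw [flood, dif_neg hm, dif_neg hb, if_neg ht]
            have hl : [(p.1 - 1, p.2), (p.1, p.2 - 1), (p.1 + 1, p.2), (p.1, p.2 + 1)]
                = [(p.1 - 1, p.2)] ++ ([(p.1, p.2 - 1)] ++ ([(p.1 + 1, p.2)] ++ [(p.1, p.2 + 1)])) := rfl
            rw [hl, flood_append, flood_append, flood_append]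
          simp only [explore_garden_plot, if_neg hm, if_neg hb, if_neg ht, e1, e2, e3, e4, hstep]
          set c0 := PySem.Set.add cache p with hc0def
          set c1 := flood grid t [(p.1 - 1, p.2)] c0 with hc1def
          set c2 := flood grid t [(p.1, p.2 - 1)] c1 with hc2def
          set c3 := flood grid t [(p.1 + 1, p.2)] c2 with hc3def
          set c4 := flood grid t [(p.1, p.2 + 1)] c3 with hc4def
          have h04 : ∀ x ∈ c0, x ∈ c4 := fun x hx =>
            hpre4.subset (hpre3.subset (hpre2.subset (hpre1.subset hx)))
          have h14 : ∀ x ∈ c1, x ∈ c4 := fun x hx => hpre4.subset (hpre3.subset (hpre2.subset hx))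
          have h24 : ∀ x ∈ c2, x ∈ c4 := fun x hx => hpre4.subset (hpre3.subset hx)
          have h34 : ∀ x ∈ c3, x ∈ c4 := fun x hx => hpre4.subset hx
          have h44 : ∀ x ∈ c4, x ∈ c4 := fun x hx => hx
          have hemp : ∀ x ∈ (PySem.Set.empty : PySem.Set (Int × Int)), x ∈ c4 := by
            intro x hx
            simp [PySem.Set.empty] at hx
          refine Prod.ext_iff.mpr ⟨?_, rfl⟩
          show ((((PySem.Set.union c4 _).union _).union _).union _) = c4
          rw [union_of_subset (by
            intro x hx
            split_ifs at hx with h1 h2 h3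
            · simp only [PySem.Set.mem_union]
              exact Or.inl (Or.inl (Or.inl (h34 x hx)))
            · simp [PySem.Set.empty] at hx
            · simp [PySem.Set.empty] at hx
            · simp only [PySem.Set.mem_union]
              exact Or.inl (Or.inl (Or.inl (h44 x hx))))]
          rw [union_of_subset (by
            intro x hx
            split_ifs at hx with h1 h2 h3
            · simp only [PySem.Set.mem_union]
              exact Or.inl (Or.inl (h24 x hx))
            · simp [PySem.Set.empty] at hx
            · simp [PySem.Set.empty] at hx
            · simp only [PySem.Set.mem_union]
              exact Or.inl (Or.inl (h34 x hx)))]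
          rw [union_of_subset (by
            intro x hx
            split_ifs at hx with h1 h2 h3
            · simp only [PySem.Set.mem_union]
              exact Or.inl (h14 x hx)
            · simp [PySem.Set.empty] at hx
            · simp [PySem.Set.empty] at hx
            · simp only [PySem.Set.mem_union]
              exact Or.inl (h24 x hx))]
          rw [union_of_subset (by
            intro x hx
            split_ifs at hx with h1 h2 h3
            · exact h04 x hx
            · simp [PySem.Set.empty] at hx
            · simp [PySem.Set.empty] at hx
            · exact h14 x hx)]

-- shorthand for the bounds test and the tile at a cell (proof-side only)
def pvOOB (grid : List (List String)) (p : Int × Int) : Prop :=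
  p.1 < 0 ∨ (grid.length : Int) ≤ p.1 ∨ p.2 < 0 ∨ ((PySem.List.pyGetD grid p.1 []).length : Int) ≤ p.2

def pvTile (grid : List (List String)) (p : Int × Int) : String :=
  PySem.List.pyGetD (PySem.List.pyGetD grid p.1 []) p.2 ""

-- the loop invariant tying A's dict to B's (dict, visited) pair
def pvInv (grid : List (List String)) (d : PySem.Dict String (List (List (Int × Int))))
    (vis : PySem.Set (Int × Int)) : Prop :=
  d.keys.Nodup ∧
  (∀ q : Int × Int, q ∈ vis ↔ ∃ pr ∈ d.items, ∃ plot ∈ pr.2, q ∈ plot) ∧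
  (∀ pr ∈ d.items, ∀ plot ∈ pr.2, ∀ q ∈ plot, ¬ pvOOB grid q ∧ pvTile grid q = pr.1)

theorem pvFoldl_rel {α σ₁ σ₂ : Type} (R : σ₁ → σ₂ → Prop) (f : σ₁ → α → σ₁) (g : σ₂ → α → σ₂) :
    ∀ (l : List α) (s1 : σ₁) (s2 : σ₂), R s1 s2 →
      (∀ a ∈ l, ∀ u1 u2, R u1 u2 → R (f u1 a) (g u2 a)) →
      R (l.foldl f s1) (l.foldl g s2)
  | [], s1, s2, h0, _ => h0
  | a :: l, s1, s2, h0, h =>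
    pvFoldl_rel R f g l (f s1 a) (g s2 a) (h a (List.mem_cons_self) s1 s2 h0)
      (fun b hb => h b (List.mem_cons_of_mem a hb))

theorem pvFree_empty (grid : List (List String)) :
    pvFree grid PySem.Set.empty = (pvCells grid).length := by
  unfold pvFree
  rw [List.filter_eq_self.2]
  intro a _
  simp [PySem.Set.empty]

theorem pvCells_length_le (grid : List (List String)) :
    (pvCells grid).length ≤ (grid.map List.length).sum := by
  have aux : ∀ (xs : List (List String)) (s : Int),
      ((PySem.List.enumerate xs s).map (fun yr => List.length yr.2)).sum = (xs.map List.length).sum := by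
    intro xs
    induction xs with
    | nil => intro s; rfl
    | cons x xs ih =>
      intro s
      rw [PySem.List.enumerate_cons]
      simp only [List.map_cons, List.sum_cons, ih]
  unfold pvCells
  rw [List.length_flatMap]
  apply le_of_eq
  calc ((PySem.List.enumerate grid 0).map
          (fun yr => ((PySem.List.enumerate yr.2).map (fun xt => (yr.1, xt.1))).length)).sum
      = ((PySem.List.enumerate grid 0).map (fun yr => List.length yr.2)).sum := by
        apply congrArg
        apply List.map_congr_left
        intro a _
        simp [PySem.List.length_enumerate]
    _ = (grid.map List.length).sum := aux grid 0

-- A's skip test equals B's, under the invariant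
theorem pvCond_iff (grid : List (List String)) (d : PySem.Dict String (List (List (Int × Int))))
    (vis : PySem.Set (Int × Int)) (hinv : pvInv grid d vis) (q : Int × Int)
    (hq : ¬ pvOOB grid q) :
    (d.contains (pvTile grid q) && position_in_plot q (d.getD (pvTile grid q) [])) = true ↔ q ∈ vis := by
  obtain ⟨hnd, hvis, htile⟩ := hinv
  constructor
  · intro h
    rw [Bool.and_eq_true] at h
    obtain ⟨hc, hp⟩ := h
    have hsome : (d.get? (pvTile grid q)).isSome := by
      rw [← PySem.Dict.contains_eq_isSome_get?]
      exact hc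
    obtain ⟨v, hv⟩ := Option.isSome_iff_exists.1 hsome
    have hdg : d.getD (pvTile grid q) [] = v := PySem.Dict.getD_of_get?_eq_some d [] hv
    have hmem : (pvTile grid q, v) ∈ d.items := PySem.Dict.mem_items_of_get?_eq_some d hv
    unfold position_in_plot at hp
    rw [List.any_eq_true] at hp
    obtain ⟨plot, hplot, hqp⟩ := hp
    rw [decide_eq_true_eq] at hqp
    rw [hdg] at hplot
    exact (hvis q).2 ⟨(pvTile grid q, v), hmem, plot, hplot, hqp⟩
  · intro h
    obtain ⟨pr, hpr, plot, hplot, hqp⟩ := (hvis q).1 h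
    obtain ⟨-, htl⟩ := htile pr hpr plot hplot q hqp
    have hget : d.get? pr.1 = some pr.2 := PySem.Dict.get?_of_mem_items d hpr hnd
    have hc : d.contains (pvTile grid q) = true := by
      rw [htl, PySem.Dict.contains_eq_isSome_get?, hget]
      rfl
    have hdg : d.getD (pvTile grid q) [] = pr.2 := by
      rw [htl]
      exact PySem.Dict.getD_of_get?_eq_some d [] hget
    rw [Bool.and_eq_true]
    refine ⟨hc, ?_⟩
    unfold position_in_plot
    rw [List.any_eq_true]
    exact ⟨plot, by rw [hdg]; exact hplot, by simp [hqp]⟩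

-- the per-cell step preserves the relation
theorem pvStep (grid : List (List String)) (d : PySem.Dict String (List (List (Int × Int))))
    (vis : PySem.Set (Int × Int)) (hinv : pvInv grid d vis) (q : Int × Int)
    (hq : ¬ pvOOB grid q) (r : PySem.Set (Int × Int))
    (hr : r = flood grid (pvTile grid q) [q] PySem.Set.empty) (hnv : q ∉ vis) :
    pvInv grid (d.insert (pvTile grid q) (d.getD (pvTile grid q) [] ++ [r])) (vis.union r) := by
  obtain ⟨hnd, hvis, htile⟩ := hinv
  have hold : d.contains (pvTile grid q) = true → (pvTile grid q, d.getD (pvTile grid q) []) ∈ d.items := by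
    intro hc
    have hsome : (d.get? (pvTile grid q)).isSome := by
      rw [← PySem.Dict.contains_eq_isSome_get?]; exact hc
    obtain ⟨v, hv⟩ := Option.isSome_iff_exists.1 hsome
    rw [PySem.Dict.getD_of_get?_eq_some d [] hv]
    exact PySem.Dict.mem_items_of_get?_eq_some d hv
  have hempty : d.contains (pvTile grid q) = false → d.getD (pvTile grid q) [] = [] := by
    intro hc
    exact PySem.Dict.getD_of_not_contains d [] hc
  have hrmem : ∀ x ∈ r, ¬ pvOOB grid x ∧ pvTile grid x = pvTile grid q := by
    intro x hx
    rw [hr] at hx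
    rcases mem_flood_iff grid (pvTile grid q) [q] PySem.Set.empty x hx with h0 | ⟨h1, h2⟩
    · simp [PySem.Set.empty] at h0
    · exact ⟨h1, h2⟩
  refine ⟨PySem.Dict.nodup_keys_insert _ _ _ hnd, ?_, ?_⟩
  · intro q'
    rw [PySem.Set.mem_union]
    constructor
    · rintro (hq' | hq')
      · obtain ⟨pr, hpr, plot, hplot, hqp⟩ := (hvis q').1 hq'
        by_cases he : pr.1 = pvTile grid q
        · have hget : d.get? pr.1 = some pr.2 := PySem.Dict.get?_of_mem_items d hpr hnd
          have hdg : d.getD (pvTile grid q) [] = pr.2 := by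
            rw [← he]
            exact PySem.Dict.getD_of_get?_eq_some d [] hget
          refine ⟨(pvTile grid q, d.getD (pvTile grid q) [] ++ [r]),
            PySem.Dict.mem_items_insert_self _ _ _, plot, ?_, hqp⟩
          rw [hdg]
          exact List.mem_append_left _ hplot
        · exact ⟨pr, (PySem.Dict.mem_items_insert _ _ _ _).2 (Or.inr ⟨hpr, he⟩), plot, hplot, hqp⟩
      · exact ⟨(pvTile grid q, d.getD (pvTile grid q) [] ++ [r]),
          PySem.Dict.mem_items_insert_self _ _ _, r, List.mem_append_right _ (List.mem_singleton.2 rfl), hq'⟩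
    · rintro ⟨pr, hpr, plot, hplot, hqp⟩
      rcases (PySem.Dict.mem_items_insert _ _ _ _).1 hpr with he | ⟨hin, hne⟩
      · subst he
        rcases List.mem_append.1 hplot with hp0 | hp1
        · cases hc : d.contains (pvTile grid q) with
          | false => rw [hempty hc] at hp0; cases hp0
          | true => exact Or.inl ((hvis q').2 ⟨_, hold hc, plot, hp0, hqp⟩)
        · rw [List.mem_singleton.1 hp1] at hqp
          exact Or.inr hqp
      · exact Or.inl ((hvis q').2 ⟨pr, hin, plot, hplot, hqp⟩)
  · intro pr hpr plot hplot q' hqp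
    rcases (PySem.Dict.mem_items_insert _ _ _ _).1 hpr with he | ⟨hin, hne⟩
    · subst he
      rcases List.mem_append.1 hplot with hp0 | hp1
      · cases hc : d.contains (pvTile grid q) with
        | false => rw [hempty hc] at hp0; cases hp0
        | true => exact htile _ (hold hc) plot hp0 q' hqp
      · rw [List.mem_singleton.1 hp1] at hqp
        exact hrmem q' hqp
    · exact htile pr hin plot hplot q' hqp

theorem pvPorts_eq : ∀ (grid : List (List String)), create_plots grid = create_plots_alt grid := by
  intro grid
  unfold create_plots create_plots_alt
  refine congrArg PySem.Dict.items
    (pvFoldl_rel (fun d st => d = st.1 ∧ pvInv grid st.1 st.2) _ _ (PySem.List.enumerate grid)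
      PySem.Dict.empty (PySem.Dict.empty, PySem.Set.empty) ⟨rfl, ?_, ?_, ?_⟩ ?_).1
  · exact PySem.Dict.nodup_keys_empty
  · intro q
    simp [PySem.Set.empty, PySem.Dict.empty]
  · intro pr hpr
    simp [PySem.Dict.empty] at hpr
  · -- outer step
    rintro yr hyr d st ⟨hd, hinv⟩
    obtain ⟨k, hk, hyre⟩ := (PySem.List.mem_enumerate_iff _ _ _).1 hyr
    subst hyre
    refine pvFoldl_rel (fun d st => d = st.1 ∧ pvInv grid st.1 st.2) _ _ (PySem.List.enumerate _) d st ⟨hd, hinv⟩ ?_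
    rintro xt hxt d' st' ⟨hd', hinv'⟩
    obtain ⟨j, hj, hxte⟩ := (PySem.List.mem_enumerate_iff _ _ _).1 hxt
    subst hxte
    subst hd'
    dsimp only
    simp only [zero_add]
    -- facts about the cell
    have hrow : PySem.List.pyGetD grid (↑k) [] = grid[k] := by
      have h := PySem.List.pyGetD_eq_getElem grid (i := (↑k : Int)) []
        (by positivity) (by exact_mod_cast hk)
      simpa using h
    have hOOB : ¬ pvOOB grid (↑k, ↑j) := by
      unfold pvOOB
      dsimp only
      rw [hrow]
      push Not
      refine ⟨by positivity, by exact_mod_cast hk, by positivity, by exact_mod_cast hj⟩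
    have hTile : pvTile grid (↑k, ↑j) = grid[k][j] := by
      unfold pvTile
      dsimp only
      rw [hrow]
      have h := PySem.List.pyGetD_eq_getElem grid[k] (i := (↑j : Int)) ""
        (by positivity) (by exact_mod_cast hj)
      simpa using h
    have hcond := pvCond_iff grid st'.1 st'.2 hinv' (↑k, ↑j) hOOB
    rw [hTile] at hcond
    by_cases hv : ((↑k : Int), (↑j : Int)) ∈ st'.2
    · rw [if_pos (hcond.2 hv), if_pos hv]
      exact ⟨rfl, hinv'⟩
    · have hcf : (st'.1.contains grid[k][j] && position_in_plot (↑k, ↑j) (st'.1.getD grid[k][j] [])) = false := by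
        cases hb : (st'.1.contains grid[k][j] && position_in_plot (↑k, ↑j) (st'.1.getD grid[k][j] [])) with
        | false => rfl
        | true => exact absurd (hcond.1 hb) hv
      rw [if_neg (by simp [hcf]), if_neg hv]
      -- the explored region
      have hfuel : pvFree grid PySem.Set.empty < (grid.map List.length).sum + 1 := by
        rw [pvFree_empty]
        have := pvCells_length_le grid
        omega
      have hexp := explore_eq ((grid.map List.length).sum + 1) grid[k][j] (↑k, ↑j) grid
        PySem.Set.empty hfuel
      have hnm : ((↑k : Int), (↑j : Int)) ∉ (PySem.Set.empty : PySem.Set (Int × Int)) := by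
        simp [PySem.Set.empty]
      unfold pvOOB at hOOB
      unfold pvTile at hTile
      rw [if_neg hnm, if_neg hOOB, if_neg (fun h => h hTile)] at hexp
      simp only [hexp]
      have hT2 : pvTile grid ((↑k : Int), (↑j : Int)) = grid[k][j] := hTile
      have hO2 : ¬ pvOOB grid ((↑k : Int), (↑j : Int)) := hOOB
      have hstep := pvStep grid st'.1 st'.2 hinv' (↑k, ↑j) hO2
        (flood grid grid[k][j] [((↑k : Int), (↑j : Int))] PySem.Set.empty) (by rw [hT2]) hv
      rw [hT2] at hstep
      refine ⟨?_, ?_⟩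
      · show _ = st'.1.modify grid[k][j] [] fun x => x ++ [flood grid grid[k][j] [((↑k : Int), (↑j : Int))] PySem.Set.empty]
        have hmod : (st'.1.modify grid[k][j] [] fun x =>
            x ++ [flood grid grid[k][j] [((↑k : Int), (↑j : Int))] PySem.Set.empty])
            = st'.1.insert grid[k][j] (st'.1.getD grid[k][j] []
              ++ [flood grid grid[k][j] [((↑k : Int), (↑j : Int))] PySem.Set.empty]) := rfl
        rw [hmod]
        by_cases hc : st'.1.contains grid[k][j]
        · simp [hc]
        · have hcf : st'.1.contains grid[k][j] = false := by simpa using hc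
          simp [hcf, PySem.Dict.getD_of_not_contains st'.1 [] hcf]
      · exact hstep

-- ===== VERDICT (by name: the statement is the Claim_ definition above) =====
theorem create_plots_spec : Claim_equal_create_plots := by
  intro grid _
  show create_plots grid = create_plots_alt grid
  exact pvPorts_eq grid
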